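-- pv_equiv track=rewrite | github.com/hbtrack/official | Hb Track - Backend/scripts/compact_exec_logs.py | _validate_proofs
-- ===== SOURCE A (Python) =====
-- from typing import Any, Dict, List, Optional, Tuple
--
-- PROOFS_REQUIRED_KEYS = [
--   "task_id:",
--   "status:",
--   "scope:",
--   "evidence_sha256:",
--   "evidence_files:",
-- ]
--
-- def _validate_proofs(text: str) -> List[str]:
--   errors: List[str] = []
--   norm = text.replace("\r\n", "\n").replace("\r", "\n")
--   lines = [ln.strip() for ln in norm.split("\n") if ln.strip()]
--   for k in PROOFS_REQUIRED_KEYS: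
--     if not any(ln.lower().startswith(k) for ln in lines):
--       errors.append(f"missing_key:{k}")
--   return errors
-- ===== SOURCE B (Python) =====
-- from typing import List
--
-- PROOFS_REQUIRED_KEYS = [
--   "task_id:",
--   "status:",
--   "scope:",
--   "evidence_sha256:",
--   "evidence_files:",
-- ]
--
-- def _validate_proofs(text: str) -> List[str]:
--   norm = text.replace("\r\n", "\n").replace("\r", "\n")
--   found = set()
--   for raw in norm.split("\n"):
--     ln = raw.strip()
--     if not ln:
--       continue
--     low = ln.lower()
--     for k in PROOFS_REQUIRED_KEYS:
--       if low.startswith(k):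
--         found.add(k)
--   return [f"missing_key:{k}" for k in PROOFS_REQUIRED_KEYS if k not in found]
-- ===== Notes on version B (the rewrite author's own statement) =====
-- stated objective: alternative
-- what changed: A scans all lines once per required key (keys-outer, lines-inner, any()); B makes one pass over the lines building a set of the keys found, then emits the missing-key messages in a second pass over the key list.
import Mathlib
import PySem

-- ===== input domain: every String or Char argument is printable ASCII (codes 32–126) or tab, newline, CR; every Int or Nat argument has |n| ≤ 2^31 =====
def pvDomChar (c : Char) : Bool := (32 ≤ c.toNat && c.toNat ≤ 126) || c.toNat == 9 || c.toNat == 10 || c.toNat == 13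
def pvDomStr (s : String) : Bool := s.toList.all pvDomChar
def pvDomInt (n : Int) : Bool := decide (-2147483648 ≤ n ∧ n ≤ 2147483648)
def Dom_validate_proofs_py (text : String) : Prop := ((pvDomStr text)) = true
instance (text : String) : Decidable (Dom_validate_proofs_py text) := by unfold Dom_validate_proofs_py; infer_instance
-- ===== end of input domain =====

-- B replaces A's keys-outer/lines-inner any() scan by a single pass over the lines that
-- records the keys found into a set, then a second pass over the key list; same output.

def proofsRequiredKeys : List String :=
  ["task_id:", "status:", "scope:", "evidence_sha256:", "evidence_files:"]

-- ===== PORT A =====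
def validate_proofs_py (text : String) : List String :=
  let norm := PySem.Str.replace (PySem.Str.replace text "\r\n" "\n") "\r" "\n"
  let lines := ((PySem.Str.split? norm "\n").getD []).filterMap
      (fun ln => if PySem.Str.strip ln ≠ "" then some (PySem.Str.strip ln) else none)
  proofsRequiredKeys.foldl
    (fun errors k =>
      if !(lines.any (fun ln => PySem.Str.startswith (PySem.Str.lower ln) k)) then
        errors ++ ["missing_key:" ++ k]
      else errors)
    []

-- ===== PORT B =====
def validate_proofs_py_alt (text : String) : List String :=
  let norm := PySem.Str.replace (PySem.Str.replace text "\r\n" "\n") "\r" "\n"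
  let found : PySem.Set String :=
    ((PySem.Str.split? norm "\n").getD []).foldl
      (fun acc raw =>
        let ln := PySem.Str.strip raw
        if ln = "" then acc
        else
          let low := PySem.Str.lower ln
          proofsRequiredKeys.foldl
            (fun acc k => if PySem.Str.startswith low k then PySem.Set.add acc k else acc)
            acc)
      PySem.Set.empty
  (proofsRequiredKeys.filter (fun k => !(PySem.Set.contains found k))).map
    (fun k => "missing_key:" ++ k)

-- ===== PRECONDITION & SPEC =====
def Spec_validate_proofs_py (text : String) (out : List String) : Prop := out = validate_proofs_py_alt text
instance (text : String) (out : List String) : Decidable (Spec_validate_proofs_py text out) := by unfold Spec_validate_proofs_py; infer_instance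

-- ===== CLAIM (what is proved, stated in full; the proofs are below) =====
def Claim_equal_validate_proofs_py : Prop := ∀ (text : String), Dom_validate_proofs_py text → Spec_validate_proofs_py text (validate_proofs_py text)

-- ===== LEMMAS AND PROOFS =====

-- membership in the inner key fold (B's per-line scan over the key list)
theorem mem_inner_fold (keys : List String) (low : String) (acc : List String) (k : String) :
    (k ∈ keys.foldl (fun acc k => if PySem.Str.startswith low k then PySem.Set.add acc k else acc) acc)
      ↔ (k ∈ acc ∨ k ∈ keys.filter (fun k => PySem.Str.startswith low k)) := by
  induction keys generalizing acc with
  | nil => simp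
  | cons h t ih =>
    rw [List.foldl_cons, List.filter_cons]
    by_cases hs : PySem.Str.startswith low h = true
    · rw [if_pos hs, if_pos hs, ih]
      simp only [PySem.Set.mem_add, List.mem_cons]
      tauto
    · rw [if_neg hs, if_neg hs, ih]

-- membership in B's found set, over the raw line list
theorem mem_found (L : List String) (k : String) (hk : k ∈ proofsRequiredKeys) (acc : List String) :
    (k ∈ L.foldl
        (fun acc raw =>
          let ln := PySem.Str.strip raw
          if ln = "" then acc
          else
            let low := PySem.Str.lower ln
            proofsRequiredKeys.foldl
              (fun acc k => if PySem.Str.startswith low k then PySem.Set.add acc k else acc) acc)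
        acc)
      ↔ (k ∈ acc ∨
          L.any (fun raw => PySem.Str.strip raw ≠ "" &&
            PySem.Str.startswith (PySem.Str.lower (PySem.Str.strip raw)) k) = true) := by
  induction L generalizing acc with
  | nil => simp
  | cons h t ih =>
    simp only [List.foldl_cons, List.any_cons, Bool.or_eq_true]
    by_cases he : PySem.Str.strip h = ""
    · rw [if_pos he, ih acc]
      simp [he]
    · rw [if_neg he, ih, mem_inner_fold]
      simp only [List.mem_filter, Bool.and_eq_true, decide_eq_true_eq, ne_eq]
      constructor
      · rintro ((h1 | ⟨_, h2⟩) | h2)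
        · exact Or.inl h1
        · exact Or.inr (Or.inl ⟨he, h2⟩)
        · exact Or.inr (Or.inr h2)
      · rintro (h1 | ⟨_, h2⟩ | h2)
        · exact Or.inl (Or.inl h1)
        · exact Or.inl (Or.inr ⟨hk, h2⟩)
        · exact Or.inr h2

-- A's any over the stripped non-empty lines equals the raw-list any
theorem any_lines_eq (L : List String) (k : String) :
    (L.filterMap (fun ln => if PySem.Str.strip ln ≠ "" then some (PySem.Str.strip ln) else none)).any
        (fun ln => PySem.Str.startswith (PySem.Str.lower ln) k)
      = L.any (fun raw => PySem.Str.strip raw ≠ "" &&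
          PySem.Str.startswith (PySem.Str.lower (PySem.Str.strip raw)) k) := by
  induction L with
  | nil => rfl
  | cons h t ih =>
    rw [List.filterMap_cons, List.any_cons]
    by_cases he : PySem.Str.strip h = ""
    · rw [if_neg (by simp [he]), ih]
      simp [he]
    · rw [if_pos (by simp [he]), List.any_cons, ih]
      simp [he]

-- ===== VERDICT (by name: the statement is the Claim_ definition above) =====
set_option maxHeartbeats 1000000 in
theorem validate_proofs_py_spec : Claim_equal_validate_proofs_py := by
  intro text _
  unfold Spec_validate_proofs_py validate_proofs_py validate_proofs_py_alt
  dsimp only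
  set L := (PySem.Str.split? (PySem.Str.replace (PySem.Str.replace text "\r\n" "\n") "\r" "\n") "\n").getD [] with hL
  clear_value L
  rw [PySem.List.foldl_append_if
        (p := fun k => !((L.filterMap (fun ln => if PySem.Str.strip ln ≠ "" then some (PySem.Str.strip ln) else none)).any
              (fun ln => PySem.Str.startswith (PySem.Str.lower ln) k)))
        (f := fun k => "missing_key:" ++ k)]
  rw [List.nil_append]
  refine congrArg (List.map (fun k => "missing_key:" ++ k)) ?_
  apply List.filter_congr
  intro k hk
  have hm := mem_found L k hk PySem.Set.empty
  rw [any_lines_eq L k]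
  refine congrArg (fun b => !b) ?_
  by_cases hf : L.any (fun raw => PySem.Str.strip raw ≠ "" &&
      PySem.Str.startswith (PySem.Str.lower (PySem.Str.strip raw)) k) = true
  · rw [hf]
    exact (List.contains_iff_mem.mpr (hm.mpr (Or.inr hf))).symm
  · simp only [Bool.not_eq_true] at hf
    rw [hf]
    symm
    rw [Bool.eq_false_iff]
    intro hc
    rcases hm.mp (List.contains_iff_mem.mp hc) with h1 | h2
    · simp [PySem.Set.empty] at h1
    · exact Bool.false_ne_true (hf ▸ h2)
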